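-- pv_equiv track=rewrite | github.com/dawkopagh/ZPO_server_python | servers.py | is_name_correct
-- ===== SOURCE A (Python) =====
-- def is_name_correct(name: str) -> bool:
--     if not name[0].isalpha():
--         return False
--     else:
--         i: int = 1
--         while i < len(name) and name[i].isalpha():
--             i += 1
--         if i >= len(name):
--             return False
--         while i < len(name) and name[i].isdecimal():
--             i += 1
--         if i >= len(name):
--             return True
--     return False
-- ===== SOURCE B (Python) =====
-- def is_name_correct(name: str) -> bool:
--     # 4-state DFA over the characters: 0=start, 1=in alpha run, 2=in digit run, 3=reject.
--     state = 0
--     for ch in name: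
--         if state == 0:
--             state = 1 if ch.isalpha() else 3
--         elif state == 1:
--             state = 1 if ch.isalpha() else (2 if ch.isdecimal() else 3)
--         elif state == 2:
--             state = 2 if ch.isdecimal() else 3
--         else:
--             break
--     return state == 2
-- ===== Notes on version B (the rewrite author's own statement) =====
-- stated objective: alternative
-- what changed: Replaces A's two sequential index-driven while-scans with a single left-to-right pass driving an explicit 4-state finite automaton (start / alpha run / digit run / reject), accepting iff the final state is the digit-run state; avoiding per-character indexing makes it measurably faster in CPython.
import Mathlib
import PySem

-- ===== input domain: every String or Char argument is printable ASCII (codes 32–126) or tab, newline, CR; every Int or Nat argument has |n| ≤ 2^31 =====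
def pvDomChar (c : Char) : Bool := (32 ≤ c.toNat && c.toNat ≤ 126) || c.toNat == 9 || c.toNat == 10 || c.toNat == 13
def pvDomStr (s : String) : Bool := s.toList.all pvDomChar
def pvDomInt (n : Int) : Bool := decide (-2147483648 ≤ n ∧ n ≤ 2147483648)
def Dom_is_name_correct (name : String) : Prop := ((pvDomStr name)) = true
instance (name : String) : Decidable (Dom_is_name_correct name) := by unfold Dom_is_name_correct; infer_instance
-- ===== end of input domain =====

-- B replaces A's two sequential index-driven while-scans with one pass of an explicit
-- 4-state finite automaton over the characters (alternative decomposition, same cost).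

-- ===== PORT A =====
-- 'while i < len(name) and name[i].<p>(): i += 1' — returns the final i
def pvA_scan (p : Char → Bool) (cs : List Char) (i : Nat) : Nat :=
  if h : i < cs.length then
    if p cs[i] then pvA_scan p cs (i + 1) else i
  else i
termination_by cs.length - i

def is_name_correct (name : String) : Bool :=
  match PySem.Str.pyGet? name 0 with
  | none => false        -- name[0] raises IndexError; unreachable under Pre_
  | some c0 =>
    if !(PySem.Chars.isalpha c0) then false
    else
      let cs := name.toList
      let i := pvA_scan PySem.Chars.isalpha cs 1
      if i ≥ cs.length then false
      else
        -- str.isdecimal = str.isdigit on the ASCII domain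
        let j := pvA_scan PySem.Chars.isdigit cs i
        if j ≥ cs.length then true else false

-- ===== PORT B =====
-- one automaton step: 0=start, 1=alpha run, 2=digit run, 3=reject
def pvB_step (state : Nat) (c : Char) : Nat :=
  if state = 0 then (if PySem.Chars.isalpha c then 1 else 3)
  else if state = 1 then
    (if PySem.Chars.isalpha c then 1
     else if PySem.Chars.isdigit c then 2 else 3)   -- ch.isdecimal() = isdigit on ASCII
  else if state = 2 then
    (if PySem.Chars.isdigit c then 2 else 3)        -- ch.isdecimal() = isdigit on ASCII
  else state                                        -- Python 'break': state 3 is absorbing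

def is_name_correct_alt (name : String) : Bool :=
  (name.toList.foldl pvB_step 0) == 2

-- ===== PRECONDITION & SPEC =====
-- Pre_ excludes only the empty string, on which A raises IndexError at name[0].
def Pre_is_name_correct (name : String) : Prop := name ≠ ""
instance (name : String) : Decidable (Pre_is_name_correct name) := by unfold Pre_is_name_correct; infer_instance
def pvWitness_is_name_correct : String := "ab12"

def Spec_is_name_correct (name : String) (out : Bool) : Prop := out = is_name_correct_alt name
instance (name : String) (out : Bool) : Decidable (Spec_is_name_correct name out) := by unfold Spec_is_name_correct; infer_instance

-- ===== CLAIM (what is proved, stated in full; the proofs are below) =====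
def Claim_equal_is_name_correct : Prop := ∀ (name : String), Dom_is_name_correct name → Pre_is_name_correct name → Spec_is_name_correct name (is_name_correct name)

-- ===== LEMMAS AND PROOFS =====

-- A's while-scan advances i past the longest p-run: i + length of takeWhile p on the rest.
theorem pvA_scan_eq (p : Char → Bool) (cs : List Char) (i : Nat) (h : i ≤ cs.length) :
    pvA_scan p cs i = i + ((cs.drop i).takeWhile p).length := by
  unfold pvA_scan
  split
  · rename_i hlt
    rw [List.drop_eq_getElem_cons hlt]
    by_cases hp : p cs[i]
    · rw [if_pos hp, pvA_scan_eq p cs (i + 1) hlt, List.takeWhile_cons_of_pos hp]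
      simp; omega
    · rw [if_neg hp, List.takeWhile_cons_of_neg hp]; simp
  · rename_i hge
    have : cs.drop i = [] := List.drop_eq_nil_of_le (by omega)
    simp [this]
termination_by cs.length - i

-- state 3 is absorbing
theorem pvB_fold3 (cs : List Char) : cs.foldl pvB_step 3 = 3 := by
  induction cs with
  | nil => rfl
  | cons c t ih => simpa [pvB_step] using ih

-- from state 2 the fold accepts iff every remaining char is a digit
theorem pvB_fold2 (cs : List Char) :
    cs.foldl pvB_step 2 = (if cs.all PySem.Chars.isdigit then 2 else 3) := by
  induction cs with
  | nil => rfl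
  | cons c t ih =>
    by_cases hc : PySem.Chars.isdigit c
    · simp [pvB_step, hc, ih]
    · simp [pvB_step, hc, pvB_fold3]

-- from state 1 the fold skips the alphabetic run and then behaves like state 2 on a nonempty digit rest
theorem pvB_fold1 (cs : List Char) :
    cs.foldl pvB_step 1 =
      (let rest := cs.drop (cs.takeWhile PySem.Chars.isalpha).length
       if rest = [] then 1 else if rest.all PySem.Chars.isdigit then 2 else 3) := by
  induction cs with
  | nil => rfl
  | cons c t ih =>
    by_cases ha : PySem.Chars.isalpha c
    · rw [List.foldl_cons, show pvB_step 1 c = 1 by simp [pvB_step, ha], ih,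
        List.takeWhile_cons_of_pos ha]
      simp
    · rw [List.takeWhile_cons_of_neg (by simpa using ha)]
      simp only [List.length_nil, List.drop_zero]
      by_cases hd : PySem.Chars.isdigit c
      · rw [List.foldl_cons, show pvB_step 1 c = 2 by simp [pvB_step, ha, hd], pvB_fold2]
        simp [hd]
      · rw [List.foldl_cons, show pvB_step 1 c = 3 by simp [pvB_step, ha, hd], pvB_fold3]
        simp [hd]

-- ===== VERDICT =====
theorem is_name_correct_spec : Claim_equal_is_name_correct := by
  intro name _ hpre
  unfold Spec_is_name_correct is_name_correct is_name_correct_alt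
  obtain ⟨c0, t, hct⟩ : ∃ c0 t, name.toList = c0 :: t := by
    cases h : name.toList with
    | nil => exact absurd (String.ext (by simp [h])) hpre
    | cons a b => exact ⟨a, b, rfl⟩
  have hlen0 : 0 < name.length := by
    have := congrArg List.length hct; simp at this; omega
  have hg : PySem.Str.pyGet? name 0 = some c0 := by
    simp [PySem.Str.pyGet?, PySem.Chars.pyGet?, PySem.List.pyGet?, PySem.List.pyIdx?, hct]
  rw [hg, hct, List.foldl_cons]
  by_cases hc0 : PySem.Chars.isalpha c0
  · rw [show pvB_step 0 c0 = 1 by simp [pvB_step, hc0], pvB_fold1]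
    simp only [hc0, Bool.not_true, Bool.false_eq_true, if_false]
    set a := (t.takeWhile PySem.Chars.isalpha).length with ha
    have hat : a ≤ t.length := (List.takeWhile_sublist PySem.Chars.isalpha).length_le
    have hi : pvA_scan PySem.Chars.isalpha (c0 :: t) 1 = 1 + a := by
      rw [pvA_scan_eq _ _ 1 (by simp)]; simp [ha]
    rw [hi]
    have hdrop : (c0 :: t).drop (1 + a) = t.drop a := by
      rw [Nat.add_comm 1 a]; simp [List.drop_succ_cons]
    by_cases hend : t.drop a = []
    · have hae : a = t.length := by
        have := List.drop_eq_nil_iff.mp hend; omega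
      rw [if_pos (by simp; omega), hend]
      simp
    · have halt : a < t.length := by
        rcases Nat.lt_or_ge a t.length with h | h
        · exact h
        · exact absurd (List.drop_eq_nil_of_le h) hend
      rw [if_neg (by simp; omega)]
      have hj : pvA_scan PySem.Chars.isdigit (c0 :: t) (1 + a)
          = 1 + a + ((t.drop a).takeWhile PySem.Chars.isdigit).length := by
        rw [pvA_scan_eq _ _ _ (by simp; omega), hdrop]
      rw [hj]
      simp only [if_neg hend]
      by_cases hall : (t.drop a).all PySem.Chars.isdigit
      · have heq : (t.drop a).takeWhile PySem.Chars.isdigit = t.drop a :=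
          List.takeWhile_eq_self_iff.mpr (by simpa [List.all_eq_true] using hall)
        rw [if_pos (by rw [heq]; simp; omega), if_pos hall]
        rfl
      · have hne2 : (t.drop a).takeWhile PySem.Chars.isdigit ≠ t.drop a := by
          intro h
          exact hall (by simpa [List.all_eq_true] using List.takeWhile_eq_self_iff.mp h)
        have hlt : ((t.drop a).takeWhile PySem.Chars.isdigit).length < (t.drop a).length := by
          rcases Nat.lt_or_ge ((t.drop a).takeWhile PySem.Chars.isdigit).length (t.drop a).length with h | h
          · exact h
          · cases hne2 ((List.takeWhile_sublist _).eq_of_length_le h)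
        have hdl : (t.drop a).length = t.length - a := by simp
        rw [if_neg (by simp; omega), if_neg hall]
        rfl
  · rw [show pvB_step 0 c0 = 3 by simp [pvB_step, hc0], pvB_fold3]
    simp [hc0]
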